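-- pv_equiv track=rewrite | github.com/chopper7/CodingBat-Python | List2/sum13.py | sum_excluding
-- ===== SOURCE A (Python) =====
-- def sum_excluding(nums, n):
--     # If n is not in list, just return sum of list
--     if n not in nums:
--         return sum(nums)
--
--     total = 0
--     # If first item is not n, add it to total.
--     if nums[0] != n:
--         total += nums[0]
--
--     # For the rest of the list, test whether current number and the number
--     # preceding it is n. If neither is n, add current number to total.
--     for i in range(1, len(nums)):
--         if nums[i] != n and nums[i-1] != n:
--             total += nums[i]
--
--     return total
-- ===== SOURCE B (Python) =====
-- def sum_excluding(nums, n):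
--     # Stage 1: split nums into the segments separated by occurrences of n.
--     segments = [[]]
--     for x in nums:
--         if x == n:
--             segments.append([])
--         else:
--             segments[-1].append(x)
--     # Stage 2: the first segment counts fully; every later segment starts right
--     # after an n, so its head is excluded and only its tail counts.
--     return sum(segments[0]) + sum(sum(seg[1:]) for seg in segments[1:])
-- ===== Notes on version B (the rewrite author's own statement) =====
-- stated objective: alternative
-- what changed: Replaced A's membership pre-check and index-based lookback sum with a two-stage algorithm: split the list into segments separated by occurrences of n, then sum the first segment fully and every later segment without its head (the element right after an n).
import Mathlib
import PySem

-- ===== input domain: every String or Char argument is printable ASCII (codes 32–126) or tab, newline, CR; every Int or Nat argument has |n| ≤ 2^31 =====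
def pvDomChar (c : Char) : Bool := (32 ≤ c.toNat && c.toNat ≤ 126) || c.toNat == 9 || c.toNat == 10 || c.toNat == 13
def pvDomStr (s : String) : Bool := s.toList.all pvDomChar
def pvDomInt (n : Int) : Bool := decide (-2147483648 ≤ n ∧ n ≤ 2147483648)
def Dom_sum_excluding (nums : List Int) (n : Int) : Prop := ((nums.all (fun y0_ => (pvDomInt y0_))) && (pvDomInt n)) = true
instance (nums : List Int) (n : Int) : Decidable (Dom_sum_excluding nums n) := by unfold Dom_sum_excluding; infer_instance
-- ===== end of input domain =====

-- B replaces A's membership pre-check and index lookback with a two-stage algorithm: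
-- split the list into segments separated by occurrences of n, then sum the first
-- segment fully and every later segment without its head (objective: alternative).

-- ===== PORT A =====
-- nums[0] and nums[i], nums[i-1] are ported with pyGetD; every such access is in range
-- on the reachable inputs (the branch requires n ∈ nums, hence nums ≠ []; i ∈ range(1, len)).
def sum_excluding (nums : List Int) (n : Int) : Int :=
  if ¬ (n ∈ nums) then nums.sum
  else
    let total0 : Int := if PySem.List.pyGetD nums 0 0 ≠ n then PySem.List.pyGetD nums 0 0 else 0
    (PySem.List.pyRange 1 (PySem.List.len nums) 1).foldl
      (fun total i =>
        if PySem.List.pyGetD nums i 0 ≠ n ∧ PySem.List.pyGetD nums (i-1) 0 ≠ n then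
          total + PySem.List.pyGetD nums i 0
        else total)
      total0

-- ===== PORT B =====
-- Source B's mutable 'segments' list with the open last segment is carried as the pair
-- (closed segments, current segment); 'segments' at the end is st.1 ++ [st.2].
def sum_excluding_alt (nums : List Int) (n : Int) : Int :=
  let st := nums.foldl
    (fun (st : List (List Int) × List Int) x =>
      if x = n then (st.1 ++ [st.2], [])
      else (st.1, st.2 ++ [x]))
    ([], [])
  match st.1 ++ [st.2] with
  | [] => 0   -- unreachable: st.1 ++ [st.2] is never empty
  | s0 :: rest => s0.sum + (rest.map (fun seg => (PySem.List.slice seg (some 1) none).sum)).sum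

-- ===== PRECONDITION & SPEC =====
def Spec_sum_excluding (nums : List Int) (n : Int) (out : Int) : Prop := out = sum_excluding_alt nums n
instance (nums : List Int) (n : Int) (out : Int) : Decidable (Spec_sum_excluding nums n out) := by unfold Spec_sum_excluding; infer_instance

-- ===== CLAIM (what is proved, stated in full; the proofs are below) =====
def Claim_equal_sum_excluding : Prop := ∀ (nums : List Int) (n : Int), Dom_sum_excluding nums n → Spec_sum_excluding nums n (sum_excluding nums n)

-- ===== LEMMAS AND PROOFS =====

-- spec n skip l = the sum of l skipping every n and the element right after an n;
-- skip says whether the element just before l was an n.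
def spec (n : Int) : Bool → List Int → Int
  | _, [] => 0
  | skip, x :: xs =>
    if x = n then spec n true xs
    else if skip then spec n false xs
    else x + spec n false xs

-- A's loop, rephrased as a recursion carrying the previous element.
def pairFold (n : Int) : Int → List Int → Int → Int
  | _, [], t => t
  | prev, x :: xs, t => pairFold n x xs (if x ≠ n ∧ prev ≠ n then t + x else t)

theorem pairFold_eq (n : Int) (l : List Int) : ∀ (prev t : Int),
    pairFold n prev l t = t + spec n (prev = n) l := by
  induction l with
  | nil => intro prev t; simp [pairFold, spec]
  | cons x xs ih =>
    intro prev t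
    by_cases hx : x = n <;> by_cases hp : prev = n <;>
      simp [pairFold, spec, hx, hp, ih] <;> omega

theorem spec_of_not_mem (n : Int) (l : List Int) (h : n ∉ l) : spec n false l = l.sum := by
  induction l with
  | nil => simp [spec]
  | cons x xs ih =>
    simp only [List.mem_cons, not_or] at h
    simp [spec, Ne.symm h.1, ih h.2]

-- the index loop of A equals pairFold, starting at index k+1 with previous element nums[k]
theorem idx_loop_eq (nums : List Int) (n : Int) : ∀ (k : Nat) (t : Int), k < nums.length →
    (PySem.List.pyRange ((k : Int) + 1) (PySem.List.len nums) 1).foldl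
      (fun total i =>
        if PySem.List.pyGetD nums i 0 ≠ n ∧ PySem.List.pyGetD nums (i-1) 0 ≠ n then
          total + PySem.List.pyGetD nums i 0
        else total)
      t = pairFold n (nums.getD k 0) (nums.drop (k+1)) t := by
  intro k
  induction hd : nums.length - (k+1) generalizing k with
  | zero =>
    intro t hk
    have hb : PySem.List.len nums ≤ (k : Int) + 1 := by
      simp [PySem.List.len]; omega
    rw [PySem.List.pyRange_one_eq_nil hb]
    have hdr : nums.drop (k+1) = [] := List.drop_eq_nil_of_le (by omega)
    simp [hdr, pairFold]
  | succ m ih =>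
    intro t hk
    have hk1 : k + 1 < nums.length := by omega
    have ha : (k : Int) + 1 < PySem.List.len nums := by
      simp [PySem.List.len]; omega
    rw [PySem.List.pyRange_one_cons ha, List.foldl_cons]
    have hg1 : PySem.List.pyGetD nums ((k : Int) + 1) 0 = nums.getD (k+1) 0 := by
      have := PySem.List.pyGetD_natCast nums (k+1) 0; push_cast at this; exact this
    have hg0 : PySem.List.pyGetD nums ((k : Int) + 1 - 1) 0 = nums.getD k 0 := by
      have := PySem.List.pyGetD_natCast nums k 0
      rw [show ((k : Int) + 1 - 1) = ((k : Nat) : Int) by ring]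
      exact this
    have hdrop : nums.drop (k+1) = nums.getD (k+1) 0 :: nums.drop (k+2) := by
      rw [List.drop_eq_getElem_cons hk1, List.getD_eq_getElem nums 0 hk1]
    have ih' := ih (k+1) (by omega)
    push_cast at ih'
    rw [hg1, hg0, hdrop]
    simp only [pairFold]
    exact ih' _ hk1

theorem a_eq_spec (nums : List Int) (n : Int) :
    sum_excluding nums n = spec n false nums := by
  by_cases hm : n ∈ nums
  · match nums, hm with
    | x :: xs, hm =>
      have hx0 : PySem.List.pyGetD (x :: xs) 0 0 = x := by
        have := PySem.List.pyGetD_natCast (x :: xs) 0 0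
        simpa using this
      have hidx := idx_loop_eq (x :: xs) n 0 (if x ≠ n then x else 0) (by simp)
      simp only [Nat.cast_zero, zero_add] at hidx
      simp only [sum_excluding, hm, not_true_eq_false, if_false, hx0]
      rw [hidx]
      simp only [List.getD_cons_zero, List.drop_succ_cons, List.drop_zero]
      rw [pairFold_eq]
      by_cases hx : x = n <;> simp [spec, hx]
  · simp [sum_excluding, hm, spec_of_not_mem n nums hm]

-- the step function of B's fold
def bstep (n : Int) (st : List (List Int) × List Int) (x : Int) : List (List Int) × List Int :=
  if x = n then (st.1 ++ [st.2], [])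
  else (st.1, st.2 ++ [x])

-- tail-sum of a later segment
def tailSum (seg : List Int) : Int := (seg.drop 1).sum

-- finalize of B: first segment fully, later segments by tail-sum
def bfin (st : List (List Int) × List Int) : Int :=
  match st.1 ++ [st.2] with
  | [] => 0
  | t0 :: ts => t0.sum + (ts.map tailSum).sum

-- B's fold from a state with at least one closed segment
theorem b_inv (n : Int) (l : List Int) : ∀ (s0 : List Int) (rest : List (List Int)) (cur : List Int),
    bfin (l.foldl (bstep n) (s0 :: rest, cur))
    = s0.sum + (rest.map tailSum).sum + tailSum cur + spec n (decide (cur = [])) l := by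
  induction l with
  | nil =>
    intro s0 rest cur
    simp [bfin, spec, List.map_append, tailSum]
    ring
  | cons x xs ih =>
    intro s0 rest cur
    by_cases hx : x = n
    · subst hx
      have h := ih s0 (rest ++ [cur]) []
      simp only [List.foldl_cons, bstep, if_true, List.cons_append, List.nil_append]
      rw [h]
      by_cases hc : cur = [] <;> simp [spec, hc, tailSum, List.map_append] <;> try ring
    · have h := ih s0 rest (cur ++ [x])
      simp only [List.foldl_cons, bstep, if_neg hx]
      rw [h]
      by_cases hc : cur = []
      · simp [spec, hx, hc, tailSum]
      · have hd : (cur ++ [x]).drop 1 = cur.drop 1 ++ [x] := by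
          cases cur with
          | nil => exact absurd rfl hc
          | cons a as => simp
        simp [spec, hx, hc, tailSum, hd]
        ring

-- B's fold from the initial first-segment state
theorem b_inv0 (n : Int) (l : List Int) : ∀ (cur : List Int),
    bfin (l.foldl (bstep n) ([], cur)) = cur.sum + spec n false l := by
  induction l with
  | nil => intro cur; simp [bfin, spec]
  | cons x xs ih =>
    intro cur
    by_cases hx : x = n
    · subst hx
      have h := b_inv x xs cur [] []
      simp only [List.foldl_cons, bstep, if_true, List.cons_append, List.nil_append]
      rw [h]
      simp [spec, tailSum]
    · have h := ih (cur ++ [x])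
      simp only [List.foldl_cons, bstep, if_neg hx]
      rw [h]
      simp [spec, hx]
      ring

theorem b_eq_spec (nums : List Int) (n : Int) :
    sum_excluding_alt nums n = spec n false nums := by
  have h0 := b_inv0 n nums []
  simp only [List.sum_nil, zero_add] at h0
  unfold sum_excluding_alt
  rw [show (fun (st : List (List Int) × List Int) x =>
        if x = n then (st.1 ++ [st.2], ([] : List Int)) else (st.1, st.2 ++ [x])) = bstep n
      from rfl]
  rw [← h0]
  unfold bfin
  have hs : ∀ seg : List Int, (PySem.List.slice seg (some 1) none).sum = tailSum seg := by
    intro seg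
    rw [PySem.List.slice_from_one]
    cases seg <;> simp [tailSum]
  simp only [hs]

-- ===== VERDICT (by name: the statement is the Claim_ definition above) =====
theorem sum_excluding_spec : Claim_equal_sum_excluding := by
  intro nums n _
  unfold Spec_sum_excluding
  rw [a_eq_spec, b_eq_spec]
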